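-- pv_equiv track=rewrite | github.com/limijd/ai-doctool2 | aidoc_strip.py | _merge_code_blocks
-- ===== SOURCE A (Python) =====
-- def _merge_code_blocks(content: str, cleanup_log: list) -> tuple[str, int]:
--     """
--     合并仅被空行分隔的相邻代码块。
--
--     只有当一个代码块结束 (```) 后紧跟空行再开始另一个无语言标识的 ```,
--     才将两者合并为一个代码块。
--     """
--     lines = content.split('\n')
--     result: list[str] = []
--     merged_count = 0
--     in_code_block = False
--     i = 0
--
--     while i < len(lines):
--         line = lines[i]
--         stripped = line.strip()
--
--         if stripped.startswith('```'):
--             if not in_code_block: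
--                 # 代码块开始
--                 in_code_block = True
--                 result.append(line)
--             else:
--                 # 代码块结束 — 查看后面是否紧跟另一个代码块
--                 in_code_block = False
--                 j = i + 1
--                 empty_indices: list[int] = []
--                 while j < len(lines) and lines[j].strip() == '':
--                     empty_indices.append(j)
--                     j += 1
--
--                 if j < len(lines) and lines[j].strip() == '```':
--                     # 下一个也是纯 ``` (无语言标识) → 合并
--                     cleanup_log.append((i + 1, line, "code_block_merge_fence"))
--                     for idx in empty_indices:
--                         cleanup_log.append((idx + 1, lines[idx], "code_block_merge_empty"))
--                     cleanup_log.append((j + 1, lines[j], "code_block_merge_fence"))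
--                     merged_count += 1
--                     in_code_block = True
--                     i = j + 1
--                     continue
--                 else:
--                     result.append(line)
--         else:
--             result.append(line)
--
--         i += 1
--
--     return '\n'.join(result), merged_count
-- ===== SOURCE B (Python) =====
-- def _merge_code_blocks(content: str, cleanup_log: list) -> tuple[str, int]:
--     """Two-pass variant: collect fence-line indices first, then walk the fence
--     sequence merging adjacent blocks; finally join the non-deleted lines."""
--     lines = content.split('\n')
--     fences = [k for k, ln in enumerate(lines) if ln.strip().startswith('```')]
--
--     delete: set = set()
--     merged_count = 0
--     in_code_block = False
--     t = 0
--     while t < len(fences):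
--         if not in_code_block:
--             in_code_block = True
--             t += 1
--             continue
--         i = fences[t]
--         if t + 1 < len(fences):
--             j = fences[t + 1]
--             if lines[j].strip() == '```' and all(
--                     lines[k].strip() == '' for k in range(i + 1, j)):
--                 cleanup_log.append((i + 1, lines[i], "code_block_merge_fence"))
--                 for k in range(i + 1, j):
--                     cleanup_log.append((k + 1, lines[k], "code_block_merge_empty"))
--                 cleanup_log.append((j + 1, lines[j], "code_block_merge_fence"))
--                 merged_count += 1
--                 for k in range(i, j + 1):
--                     delete.add(k)
--                 t += 2  # stay inside the (now merged) block
--                 continue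
--         in_code_block = False
--         t += 1
--
--     out = '\n'.join(ln for k, ln in enumerate(lines) if k not in delete)
--     return out, merged_count
-- ===== Notes on version B (the rewrite author's own statement) =====
-- stated objective: alternative
-- what changed: Replaces A's single line-by-line loop with in-place blank lookahead by a two-pass decomposition: first collect all fence-line indices, then walk only the fence sequence (marking merged gaps in a delete set), and finally emit every non-deleted line in one filter pass.
import Mathlib
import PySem

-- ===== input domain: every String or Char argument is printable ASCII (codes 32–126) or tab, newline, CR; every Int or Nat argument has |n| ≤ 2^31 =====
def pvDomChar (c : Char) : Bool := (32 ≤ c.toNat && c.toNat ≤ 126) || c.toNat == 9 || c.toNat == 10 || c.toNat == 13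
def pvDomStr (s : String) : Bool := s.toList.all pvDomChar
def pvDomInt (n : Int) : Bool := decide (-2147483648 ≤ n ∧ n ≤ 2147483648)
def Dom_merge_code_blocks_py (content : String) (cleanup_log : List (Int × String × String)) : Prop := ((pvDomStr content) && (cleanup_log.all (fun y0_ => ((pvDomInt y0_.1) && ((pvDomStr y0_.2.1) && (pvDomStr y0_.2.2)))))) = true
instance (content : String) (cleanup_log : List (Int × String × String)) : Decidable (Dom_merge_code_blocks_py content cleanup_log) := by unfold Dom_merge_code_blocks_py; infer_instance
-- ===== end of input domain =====

-- B replaces A's single line-by-line loop with a lookahead by a two-pass scheme (collect fence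
-- indices, then walk the fence sequence and finally filter the lines); objective: alternative
-- decomposition, same cost. Both Pythons append the same tuples to cleanup_log (same in-place
-- mutation); the equivalence proved here is about the RETURN value (String × Int).
-- In both ports list indexing lines[k] is rendered as lines.getD k "" with a Nat index: every
-- index the Python reads is nonnegative and < len(lines) (guarded by the loops), so this is exact.

-- ===== PORT A =====
-- A's inner `while j < len(lines) and lines[j].strip() == ''` loop: first index ≥ j whose
-- stripped line is non-empty (or len(lines)).
def mergeA_skip (lines : List String) (j : Nat) : Nat :=
  if h : j < lines.length ∧ PySem.Str.strip (lines.getD j "") = "" then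
    mergeA_skip lines (j + 1)
  else j
termination_by lines.length - j
decreasing_by have := h.1; omega

-- needed by mergeA_loop's termination (the port cites it in decreasing_by)
theorem mergeA_skip_ge (lines : List String) (j : Nat) : j ≤ mergeA_skip lines j := by
  induction j using mergeA_skip.induct lines with
  | case1 j h ih => rw [mergeA_skip, dif_pos h]; omega
  | case2 j h => rw [mergeA_skip, dif_neg h]

def mergeA_loop (lines : List String) (i : Nat) (result : List String)
    (merged : Int) (inBlock : Bool) (log : List (Int × String × String)) :
    List String × Int :=
  if _hi : i < lines.length then
    let line := lines.getD i ""
    let stripped := PySem.Str.strip line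
    if PySem.Str.startswith stripped "```" = true then
      if inBlock = false then
        mergeA_loop lines (i + 1) (result ++ [line]) merged true log
      else
        let j := mergeA_skip lines (i + 1)
        if j < lines.length ∧ PySem.Str.strip (lines.getD j "") = "```" then
          -- merge: log the fence, the blanks, the next fence; skip to j+1, stay in block
          mergeA_loop lines (j + 1) result (merged + 1) true
            (log ++ [(((i : Int) + 1), line, "code_block_merge_fence")]
                 ++ (List.range' (i + 1) (j - (i + 1))).map
                      (fun (k : Nat) => (((k : Int) + 1), lines.getD k "", "code_block_merge_empty"))
                 ++ [(((j : Int) + 1), lines.getD j "", "code_block_merge_fence")])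
        else
          mergeA_loop lines (i + 1) (result ++ [line]) merged false log
    else
      mergeA_loop lines (i + 1) (result ++ [line]) merged inBlock log
  else (result, merged)
termination_by lines.length - i
decreasing_by
  · omega
  · have := mergeA_skip_ge lines (i + 1); omega
  · omega
  · omega

def merge_code_blocks_py (content : String) (cleanup_log : List (Int × String × String)) : String × Int :=
  -- content.split('\n'): sep ≠ "" so split? = some, getD is exact
  let lines := (PySem.Str.split? content "\n").getD []
  let r := mergeA_loop lines 0 [] 0 false cleanup_log
  (PySem.Str.join "\n" r.1, r.2)

-- ===== PORT B =====
-- walk the fence-index sequence; when a closing fence is followed (across blanks only) by a bare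
-- ``` fence, mark the whole gap deleted and stay inside the block
def mergeB_loop (lines : List String) (fences : List Nat) (inBlock : Bool)
    (deleteS : PySem.Set Nat) (merged : Int) (log : List (Int × String × String)) :
    PySem.Set Nat × Int :=
  match fences with
  | [] => (deleteS, merged)
  | f :: rest =>
    if inBlock = false then
      mergeB_loop lines rest true deleteS merged log
    else
      match _hr : rest with
      | g :: rest' =>
        if PySem.Str.strip (lines.getD g "") = "```" ∧
            ∀ k ∈ List.range' (f + 1) (g - (f + 1)), PySem.Str.strip (lines.getD k "") = "" then
          mergeB_loop lines rest' true
            ((List.range' f (g + 1 - f)).foldl (fun s k => PySem.Set.add s k) deleteS)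
            (merged + 1)
            (log ++ [(((f : Int) + 1), lines.getD f "", "code_block_merge_fence")]
                 ++ (List.range' (f + 1) (g - (f + 1))).map
                      (fun (k : Nat) => (((k : Int) + 1), lines.getD k "", "code_block_merge_empty"))
                 ++ [(((g : Int) + 1), lines.getD g "", "code_block_merge_fence")])
        else
          mergeB_loop lines rest false deleteS merged log
      | [] => mergeB_loop lines rest false deleteS merged log
termination_by fences.length
decreasing_by all_goals (simp only [List.length_cons, *]; omega)

def merge_code_blocks_py_alt (content : String) (cleanup_log : List (Int × String × String)) : String × Int :=
  let lines := (PySem.Str.split? content "\n").getD []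
  -- [k for k, ln in enumerate(lines) if ln.strip().startswith('```')]
  let fences := (List.range' 0 lines.length).filter
      (fun k => PySem.Str.startswith (PySem.Str.strip (lines.getD k "")) "```")
  let r := mergeB_loop lines fences false PySem.Set.empty 0 cleanup_log
  -- '\n'.join(ln for k, ln in enumerate(lines) if k not in delete)
  (PySem.Str.join "\n"
      ((List.range' 0 lines.length).filterMap
        (fun k => if PySem.Set.contains r.1 k = true then none else some (lines.getD k ""))),
   r.2)

-- ===== PRECONDITION & SPEC =====
def Spec_merge_code_blocks_py (content : String) (cleanup_log : List (Int × String × String)) (out : String × Int) : Prop := out = merge_code_blocks_py_alt content cleanup_log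
instance (content : String) (cleanup_log : List (Int × String × String)) (out : String × Int) : Decidable (Spec_merge_code_blocks_py content cleanup_log out) := by unfold Spec_merge_code_blocks_py; infer_instance

-- ===== CLAIM (what is proved, stated in full; the proofs are below) =====
def Claim_equal_merge_code_blocks_py : Prop := ∀ (content : String) (cleanup_log : List (Int × String × String)), Dom_merge_code_blocks_py content cleanup_log → Spec_merge_code_blocks_py content cleanup_log (merge_code_blocks_py content cleanup_log)

-- ===== LEMMAS AND PROOFS =====

-- reference function: kept lines and merge count of the suffix starting at i
def refS (lines : List String) (i : Nat) (inBlock : Bool) : List String × Int :=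
  if _hi : i < lines.length then
    let line := lines.getD i ""
    if PySem.Str.startswith (PySem.Str.strip line) "```" = true then
      if inBlock = false then
        let r := refS lines (i + 1) true; (line :: r.1, r.2)
      else
        let j := mergeA_skip lines (i + 1)
        if j < lines.length ∧ PySem.Str.strip (lines.getD j "") = "```" then
          let r := refS lines (j + 1) true; (r.1, r.2 + 1)
        else
          let r := refS lines (i + 1) false; (line :: r.1, r.2)
    else
      let r := refS lines (i + 1) inBlock; (line :: r.1, r.2)
  else ([], 0)
termination_by lines.length - i
decreasing_by
  · omega
  · have := mergeA_skip_ge lines (i + 1); omega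
  · omega
  · omega

-- membership in a PySem set, Bool side
theorem set_contains_iff (s : PySem.Set Nat) (x : Nat) :
    PySem.Set.contains s x = true ↔ x ∈ s := by
  simp [PySem.Set.contains]

theorem blank_not_fence (x : String) (h : PySem.Str.strip x = "") :
    PySem.Str.startswith (PySem.Str.strip x) "```" = false := by
  rw [h]; decide

theorem bare_is_fence (x : String) (h : PySem.Str.strip x = "```") :
    PySem.Str.startswith (PySem.Str.strip x) "```" = true := by
  rw [h]; decide

-- characterisation of mergeA_skip
theorem mergeA_skip_blank (lines : List String) (j : Nat) :
    ∀ k, j ≤ k → k < mergeA_skip lines j → PySem.Str.strip (lines.getD k "") = "" := by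
  induction j using mergeA_skip.induct lines with
  | case1 j h ih =>
    intro k hk1 hk2
    rw [mergeA_skip, dif_pos h] at hk2
    rcases Nat.eq_or_lt_of_le hk1 with rfl | hlt
    · exact h.2
    · exact ih k hlt hk2
  | case2 j h =>
    intro k hk1 hk2
    rw [mergeA_skip, dif_neg h] at hk2; omega

theorem mergeA_skip_unique (lines : List String) (j : Nat) (t : Nat)
    (hjt : j ≤ t) (htlen : t < lines.length)
    (hblank : ∀ k, j ≤ k → k < t → PySem.Str.strip (lines.getD k "") = "")
    (hstop : PySem.Str.strip (lines.getD t "") ≠ "") :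
    mergeA_skip lines j = t := by
  induction j using mergeA_skip.induct lines with
  | case1 j h ih =>
    rw [mergeA_skip, dif_pos h]
    rcases Nat.eq_or_lt_of_le hjt with rfl | hlt
    · exact absurd h.2 hstop
    · exact ih hlt (fun k hk1 hk2 => hblank k (by omega) hk2)
  | case2 j h =>
    rw [mergeA_skip]
    rw [dif_neg h]
    rcases Nat.eq_or_lt_of_le hjt with rfl | hlt
    · rfl
    · exact absurd ⟨by omega, hblank j (le_refl j) hlt⟩ h

-- the fence-index list of the suffix starting at i (what B's first pass computes, from i on)
def fencesFrom (lines : List String) (i : Nat) : List Nat :=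
  (List.range' i (lines.length - i)).filter
    (fun k => PySem.Str.startswith (PySem.Str.strip (lines.getD k "")) "```")

theorem fencesFrom_nil (lines : List String) (i : Nat) (h : lines.length ≤ i) :
    fencesFrom lines i = [] := by
  unfold fencesFrom
  rw [Nat.sub_eq_zero_of_le h]
  rfl

theorem fencesFrom_cons (lines : List String) (i : Nat) (h : i < lines.length) :
    fencesFrom lines i =
      if PySem.Str.startswith (PySem.Str.strip (lines.getD i "")) "```" = true then
        i :: fencesFrom lines (i + 1)
      else fencesFrom lines (i + 1) := by
  unfold fencesFrom
  have h1 : lines.length - i = (lines.length - (i + 1)) + 1 := by omega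
  rw [h1, List.range'_succ, List.filter_cons]

theorem mem_fencesFrom (lines : List String) (i : Nat) (k : Nat) :
    k ∈ fencesFrom lines i ↔
      i ≤ k ∧ k < lines.length ∧
        PySem.Str.startswith (PySem.Str.strip (lines.getD k "")) "```" = true := by
  unfold fencesFrom
  simp only [List.mem_filter, List.mem_range']
  constructor
  · rintro ⟨⟨x, hx1, hx2⟩, hf⟩
    exact ⟨by omega, by omega, hf⟩
  · rintro ⟨h1, h2, h3⟩
    exact ⟨⟨k - i, by omega, by omega⟩, h3⟩

theorem fencesFrom_of_blank (lines : List String) (t : Nat) :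
    ∀ i, i ≤ t →
      (∀ k, i ≤ k → k < t → PySem.Str.strip (lines.getD k "") = "") →
      fencesFrom lines i = fencesFrom lines t := by
  intro i
  induction ht : t - i generalizing i with
  | zero =>
    intro hle _
    have : i = t := by omega
    rw [this]
  | succ n ih =>
    intro hle hblank
    have hit : i < t := by omega
    by_cases hi : i < lines.length
    · have hf := blank_not_fence _ (hblank i le_rfl hit)
      rw [fencesFrom_cons lines i hi]
      simp only [hf, Bool.false_eq_true, if_false]
      exact ih (i + 1) (by omega) (by omega)
        (fun k hk1 hk2 => hblank k (by omega) hk2)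
    · rw [fencesFrom_nil lines i (by omega), fencesFrom_nil lines t (by omega)]

-- kept lines of the suffix starting at i, given the final delete set
def keptFrom (lines : List String) (i : Nat) (d : PySem.Set Nat) : List String :=
  (List.range' i (lines.length - i)).filterMap
    (fun k => if PySem.Set.contains d k = true then none else some (lines.getD k ""))

theorem keptFrom_nil (lines : List String) (i : Nat) (d : PySem.Set Nat)
    (h : lines.length ≤ i) : keptFrom lines i d = [] := by
  unfold keptFrom
  rw [Nat.sub_eq_zero_of_le h]
  rfl

theorem keptFrom_cons (lines : List String) (i : Nat) (d : PySem.Set Nat)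
    (h : i < lines.length) :
    keptFrom lines i d =
      if PySem.Set.contains d i = true then keptFrom lines (i + 1) d
      else lines.getD i "" :: keptFrom lines (i + 1) d := by
  unfold keptFrom
  have h1 : lines.length - i = (lines.length - (i + 1)) + 1 := by omega
  rw [h1, List.range'_succ, List.filterMap_cons]
  split <;> simp_all

theorem keptFrom_of_deleted (lines : List String) (d : PySem.Set Nat) (t : Nat) :
    ∀ i, i ≤ t → (∀ k, i ≤ k → k < t → k ∈ d) →
      keptFrom lines i d = keptFrom lines t d := by
  intro i
  induction ht : t - i generalizing i with
  | zero =>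
    intro hle _
    have : i = t := by omega
    rw [this]
  | succ n ih =>
    intro hle hdel
    have hit : i < t := by omega
    by_cases hi : i < lines.length
    · have hc : PySem.Set.contains d i = true := (set_contains_iff d i).2 (hdel i le_rfl hit)
      rw [keptFrom_cons lines i d hi]
      simp only [hc, if_true]
      exact ih (i + 1) (by omega) (by omega)
        (fun k hk1 hk2 => hdel k (by omega) hk2)
    · rw [keptFrom_nil lines i d (by omega), keptFrom_nil lines t d (by omega)]

theorem mergeA_loop_eq (lines : List String) (n : Nat) : ∀ i, lines.length - i ≤ n →
    ∀ result merged inBlock log,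
      mergeA_loop lines i result merged inBlock log
        = (result ++ (refS lines i inBlock).1, merged + (refS lines i inBlock).2) := by
  induction n with
  | zero =>
    intro i hni result merged inBlock log
    have hi : ¬ i < lines.length := by omega
    rw [mergeA_loop, dif_neg hi, refS, dif_neg hi]
    simp
  | succ n ih =>
    intro i hni result merged inBlock log
    by_cases hi : i < lines.length
    · rw [mergeA_loop, dif_pos hi, refS, dif_pos hi]
      by_cases hf : PySem.Str.startswith (PySem.Str.strip (lines.getD i "")) "```" = true
      · rw [if_pos hf, if_pos hf]
        by_cases hb : inBlock = false
        · rw [if_pos hb, if_pos hb]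
          rw [ih (i + 1) (by omega)]
          simp
        · rw [if_neg hb, if_neg hb]
          by_cases hA : mergeA_skip lines (i + 1) < lines.length ∧
              PySem.Str.strip (lines.getD (mergeA_skip lines (i + 1)) "") = "```"
          · rw [if_pos hA, if_pos hA]
            rw [ih (mergeA_skip lines (i + 1) + 1)
              (by have := mergeA_skip_ge lines (i + 1); omega)]
            exact Prod.ext (by simp) (by simp; omega)
          · rw [if_neg hA, if_neg hA]
            rw [ih (i + 1) (by omega)]
            simp
      · rw [if_neg hf, if_neg hf]
        rw [ih (i + 1) (by omega)]
        simp
    · rw [mergeA_loop, dif_neg hi, refS, dif_neg hi]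
      simp

theorem mergeB_main (lines : List String) (n : Nat) : ∀ i, lines.length - i ≤ n →
    ∀ inBlock (d : PySem.Set Nat) m log, (∀ x ∈ d, x < i) →
      (mergeB_loop lines (fencesFrom lines i) inBlock d m log).2
          = m + (refS lines i inBlock).2
      ∧ (∀ x ∈ d, x ∈ (mergeB_loop lines (fencesFrom lines i) inBlock d m log).1)
      ∧ (∀ x ∈ (mergeB_loop lines (fencesFrom lines i) inBlock d m log).1, x ∈ d ∨ i ≤ x)
      ∧ keptFrom lines i (mergeB_loop lines (fencesFrom lines i) inBlock d m log).1
          = (refS lines i inBlock).1 := by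
  induction n with
  | zero =>
    intro i hni inBlock d m log hd
    have hi : ¬ i < lines.length := by omega
    rw [fencesFrom_nil lines i (by omega), refS, dif_neg hi]
    have hnil : mergeB_loop lines [] inBlock d m log = (d, m) := by
      rw [mergeB_loop.eq_def]
    rw [hnil]
    exact ⟨by simp, fun x hx => hx, fun x hx => Or.inl hx,
      keptFrom_nil lines i _ (by omega)⟩
  | succ n ih =>
    intro i hni inBlock d m log hd
    by_cases hi : i < lines.length
    case neg =>
      rw [fencesFrom_nil lines i (by omega), refS, dif_neg hi]
      have hnil : mergeB_loop lines [] inBlock d m log = (d, m) := by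
        rw [mergeB_loop.eq_def]
      rw [hnil]
      exact ⟨by simp, fun x hx => hx, fun x hx => Or.inl hx,
        keptFrom_nil lines i _ (by omega)⟩
    case pos =>
    rw [refS, dif_pos hi]
    by_cases hf : PySem.Str.startswith (PySem.Str.strip (lines.getD i "")) "```" = true
    case neg =>
      -- not a fence line: B's fence list is unchanged, the line is kept
      rw [fencesFrom_cons lines i hi, if_neg hf, if_neg hf]
      obtain ⟨h1, h2, h3, h4⟩ := ih (i + 1) (by omega) inBlock d m log
        (fun x hx => by have := hd x hx; omega)
      refine ⟨by rw [h1], h2, fun x hx => ?_, ?_⟩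
      · rcases h3 x hx with h | h
        · exact Or.inl h
        · exact Or.inr (by omega)
      · have hnotin : i ∉ (mergeB_loop lines (fencesFrom lines (i + 1)) inBlock d m log).1 := by
          intro hmem
          rcases h3 i hmem with h | h
          · exact absurd (hd i h) (by omega)
          · omega
        rw [keptFrom_cons lines i _ hi,
          if_neg (by rw [set_contains_iff]; exact hnotin), h4]
    case pos =>
    rw [fencesFrom_cons lines i hi, if_pos hf, if_pos hf]
    by_cases hb : inBlock = false
    case pos =>
      -- opening fence
      subst hb
      rw [if_pos rfl]
      have hstep : mergeB_loop lines (i :: fencesFrom lines (i + 1)) false d m log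
          = mergeB_loop lines (fencesFrom lines (i + 1)) true d m log := by
        rw [mergeB_loop.eq_def]
        simp only []
        rw [if_pos trivial]
      rw [hstep]
      obtain ⟨h1, h2, h3, h4⟩ := ih (i + 1) (by omega) true d m log
        (fun x hx => by have := hd x hx; omega)
      refine ⟨by rw [h1], h2, fun x hx => ?_, ?_⟩
      · rcases h3 x hx with h | h
        · exact Or.inl h
        · exact Or.inr (by omega)
      · have hnotin : i ∉ (mergeB_loop lines (fencesFrom lines (i + 1)) true d m log).1 := by
          intro hmem
          rcases h3 i hmem with h | h
          · exact absurd (hd i h) (by omega)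
          · omega
        rw [keptFrom_cons lines i _ hi,
          if_neg (by rw [set_contains_iff]; exact hnotin), h4]
    case neg =>
      -- closing fence
      rw [if_neg hb]
      have hbt : inBlock = true := by revert hb; cases inBlock <;> simp
      subst hbt
      by_cases hA : mergeA_skip lines (i + 1) < lines.length ∧
          PySem.Str.strip (lines.getD (mergeA_skip lines (i + 1)) "") = "```"
      case pos =>
        rw [if_pos hA]
        have hij : i + 1 ≤ mergeA_skip lines (i + 1) := mergeA_skip_ge lines (i + 1)
        have hblank := mergeA_skip_blank lines (i + 1)
        have hFF : fencesFrom lines (i + 1)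
            = mergeA_skip lines (i + 1) :: fencesFrom lines (mergeA_skip lines (i + 1) + 1) := by
          rw [fencesFrom_of_blank lines (mergeA_skip lines (i + 1)) (i + 1) hij hblank,
            fencesFrom_cons lines _ hA.1, if_pos (bare_is_fence _ hA.2)]
        rw [hFF]
        have hcond : PySem.Str.strip (lines.getD (mergeA_skip lines (i + 1)) "") = "```" ∧
            ∀ k ∈ List.range' (i + 1) (mergeA_skip lines (i + 1) - (i + 1)),
              PySem.Str.strip (lines.getD k "") = "" := by
          refine ⟨hA.2, fun k hk => ?_⟩
          obtain ⟨x, hx1, hx2⟩ := List.mem_range'.1 hk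
          exact hblank k (by omega) (by omega)
        have hstep : mergeB_loop lines
              (i :: mergeA_skip lines (i + 1) :: fencesFrom lines (mergeA_skip lines (i + 1) + 1))
              true d m log
            = mergeB_loop lines (fencesFrom lines (mergeA_skip lines (i + 1) + 1)) true
                ((List.range' i (mergeA_skip lines (i + 1) + 1 - i)).foldl
                  (fun s k => PySem.Set.add s k) d)
                (m + 1)
                (log ++ [(((i : Int) + 1), lines.getD i "", "code_block_merge_fence")]
                 ++ (List.range' (i + 1) (mergeA_skip lines (i + 1) - (i + 1))).map
                      (fun (k : Nat) => (((k : Int) + 1), lines.getD k "", "code_block_merge_empty"))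
                 ++ [(((mergeA_skip lines (i + 1) : Int) + 1), lines.getD (mergeA_skip lines (i + 1)) "",
                      "code_block_merge_fence")]) := by
          rw [mergeB_loop.eq_def]
          simp only []
          rw [if_neg (by simp), if_pos hcond]
        rw [hstep]
        have hd2mem : ∀ x, x ∈ (List.range' i (mergeA_skip lines (i + 1) + 1 - i)).foldl
            (fun s k => PySem.Set.add s k) d ↔
            x ∈ d ∨ (i ≤ x ∧ x < mergeA_skip lines (i + 1) + 1) := by
          intro x
          have hupd : (List.range' i (mergeA_skip lines (i + 1) + 1 - i)).foldl
              (fun s k => PySem.Set.add s k) d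
              = PySem.Set.update d (List.range' i (mergeA_skip lines (i + 1) + 1 - i)) := rfl
          rw [hupd, PySem.Set.mem_update]
          constructor
          · rintro (h | h)
            · exact Or.inl h
            · obtain ⟨x', hx1, hx2⟩ := List.mem_range'.1 h
              exact Or.inr ⟨by omega, by omega⟩
          · rintro (h | h)
            · exact Or.inl h
            · exact Or.inr (List.mem_range'.2 ⟨x - i, by omega, by omega⟩)
        obtain ⟨h1, h2, h3, h4⟩ := ih (mergeA_skip lines (i + 1) + 1) (by omega) true _ (m + 1) _
          (fun x hx => by
            rcases (hd2mem x).1 hx with h | h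
            · have := hd x h; omega
            · omega)
        refine ⟨?_, fun x hx => h2 x ((hd2mem x).2 (Or.inl hx)), fun x hx => ?_, ?_⟩
        · rw [h1]
          show m + 1 + (refS lines (mergeA_skip lines (i + 1) + 1) true).2
            = m + ((refS lines (mergeA_skip lines (i + 1) + 1) true).2 + 1)
          omega
        · rcases h3 x hx with h | h
          · rcases (hd2mem x).1 h with h' | h'
            · exact Or.inl h'
            · exact Or.inr (by omega)
          · exact Or.inr (by omega)
        · rw [keptFrom_of_deleted lines _ (mergeA_skip lines (i + 1) + 1) i (by omega)
            (fun k hk1 hk2 => h2 k ((hd2mem k).2 (Or.inr ⟨hk1, hk2⟩))), h4]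
      case neg =>
        rw [if_neg hA]
        have hstep : mergeB_loop lines (i :: fencesFrom lines (i + 1)) true d m log
            = mergeB_loop lines (fencesFrom lines (i + 1)) false d m log := by
          cases hF : fencesFrom lines (i + 1) with
          | nil =>
            rw [mergeB_loop.eq_def]
            simp only []
            rw [if_neg (by simp), mergeB_loop.eq_def]
          | cons g F' =>
            have hgmem : g ∈ fencesFrom lines (i + 1) := by
              rw [hF]; exact List.mem_cons_self
            rw [mem_fencesFrom] at hgmem
            have hcondF : ¬ (PySem.Str.strip (lines.getD g "") = "```" ∧
                ∀ k ∈ List.range' (i + 1) (g - (i + 1)),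
                  PySem.Str.strip (lines.getD k "") = "") := by
              rintro ⟨hg1, hg2⟩
              have hsk : mergeA_skip lines (i + 1) = g := by
                refine mergeA_skip_unique lines (i + 1) g hgmem.1 hgmem.2.1
                  (fun k hk1 hk2 => hg2 k (List.mem_range'.2 ⟨k - (i + 1), by omega, by omega⟩))
                  (by rw [hg1]; decide)
              exact hA (hsk ▸ ⟨hgmem.2.1, hg1⟩)
            rw [mergeB_loop.eq_def]
            simp only []
            rw [if_neg (by simp), if_neg hcondF]
        rw [hstep]
        obtain ⟨h1, h2, h3, h4⟩ := ih (i + 1) (by omega) false d m log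
          (fun x hx => by have := hd x hx; omega)
        refine ⟨by rw [h1], h2, fun x hx => ?_, ?_⟩
        · rcases h3 x hx with h | h
          · exact Or.inl h
          · exact Or.inr (by omega)
        · have hnotin : i ∉ (mergeB_loop lines (fencesFrom lines (i + 1)) false d m log).1 := by
            intro hmem
            rcases h3 i hmem with h | h
            · exact absurd (hd i h) (by omega)
            · omega
          rw [keptFrom_cons lines i _ hi,
            if_neg (by rw [set_contains_iff]; exact hnotin), h4]

-- ===== VERDICT (by name: the statement is the Claim_ definition above) =====
theorem merge_code_blocks_py_spec : Claim_equal_merge_code_blocks_py := by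
  unfold Claim_equal_merge_code_blocks_py
  intro content log _
  unfold Spec_merge_code_blocks_py merge_code_blocks_py merge_code_blocks_py_alt
  set lines := (PySem.Str.split? content "\n").getD [] with hl
  have hA := mergeA_loop_eq lines lines.length 0 (by omega) [] 0 false log
  have hfz : (List.range' 0 lines.length).filter
      (fun k => PySem.Str.startswith (PySem.Str.strip (lines.getD k "")) "```")
      = fencesFrom lines 0 := by
    unfold fencesFrom
    rw [Nat.sub_zero]
  have hempty : ∀ x ∈ (PySem.Set.empty : PySem.Set Nat), x < 0 := by
    intro x hx
    simp [PySem.Set.empty] at hx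
  obtain ⟨h1, _, _, h4⟩ :=
    mergeB_main lines lines.length 0 (by omega) false PySem.Set.empty 0 log hempty
  have hkept : (List.range' 0 lines.length).filterMap
      (fun k => if PySem.Set.contains
          (mergeB_loop lines (fencesFrom lines 0) false PySem.Set.empty 0 log).1 k = true
        then none else some (lines.getD k ""))
      = keptFrom lines 0 (mergeB_loop lines (fencesFrom lines 0) false PySem.Set.empty 0 log).1 := by
    unfold keptFrom
    rw [Nat.sub_zero]
  simp only [hA, hfz, hkept, h4, h1, List.nil_append]
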